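-- pv_equiv track=rewrite | github.com/ri-sh/Form16Extractor | form16_extractor/extractors/domains/salary/perquisite_extractor.py | _map_description_to_category
-- ===== SOURCE A (Python) =====
-- def _map_description_to_category(desc_str: str) -> str:
--     """Map Form 12BA description to perquisite category"""
--     desc_lower = desc_str.lower()
--
--     # Direct keyword mapping
--     if 'stock options' in desc_lower and ('non-qualified' in desc_lower or 'other than esop' in desc_lower):
--         return 'stock_options_esop'
--     elif 'accommodation' in desc_lower:
--         return 'accommodation_perquisite'
--     elif any(word in desc_lower for word in ['car', 'automotive', 'vehicle']):
--         return 'car_perquisite'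
--     elif 'free meals' in desc_lower or 'meals' in desc_lower:
--         return 'free_meals'
--     elif 'education' in desc_lower:
--         return 'education_fees'
--     elif 'credit card' in desc_lower:
--         return 'credit_card_fees'
--     elif 'club' in desc_lower:
--         return 'club_membership'
--     elif 'holiday' in desc_lower:
--         return 'holiday_travel'
--     elif any(word in desc_lower for word in ['sweeper', 'gardener', 'watchman', 'attendant']):
--         return 'domestic_help'
--     elif any(word in desc_lower for word in ['gas', 'electricity', 'water']):
--         return 'other_perquisites'  # Utilities
--     elif 'loan' in desc_lower:
--         return 'concessional_loans'
--     elif any(word in desc_lower for word in ['gift', 'voucher']):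
--         return 'other_perquisites'
--     elif any(word in desc_lower for word in ['other benefit', 'amenity', 'service', 'privilege']):
--         return 'other_perquisites'
--     else:
--         # Fallback for unrecognized categories
--         return 'other_perquisites'
-- ===== SOURCE B (Python) =====
-- _PRIORITY = {
--     'accommodation': 0,
--     'car': 1, 'automotive': 1, 'vehicle': 1,
--     'meals': 2,
--     'education': 3,
--     'credit card': 4,
--     'club': 5,
--     'holiday': 6,
--     'sweeper': 7, 'gardener': 7, 'watchman': 7, 'attendant': 7,
--     'gas': 8, 'electricity': 8, 'water': 8,
--     'loan': 9,
-- }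
--
-- _CATEGORIES = [
--     'accommodation_perquisite', 'car_perquisite', 'free_meals',
--     'education_fees', 'credit_card_fees', 'club_membership',
--     'holiday_travel', 'domestic_help', 'other_perquisites',
--     'concessional_loans',
-- ]
--
--
-- def _map_description_to_category(desc_str: str) -> str:
--     d = desc_str.lower()
--     if 'stock options' in d and ('non-qualified' in d or 'other than esop' in d):
--         return 'stock_options_esop'
--     hits = [p for kw, p in _PRIORITY.items() if kw in d]
--     return _CATEGORIES[min(hits)] if hits else 'other_perquisites'
-- ===== Notes on version B (the rewrite author's own statement) =====
-- stated objective: alternative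
-- what changed: Instead of A's first-match if-elif ladder, B collects the priorities of ALL keywords occurring in the lowercased string from a flat keyword->priority table, takes the minimum, and indexes a category array; only the compound stock-options rule stays an explicit guard; correctness holds because the table is priority-sorted, so the minimum matching priority equals the first matching branch.
import Mathlib
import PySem

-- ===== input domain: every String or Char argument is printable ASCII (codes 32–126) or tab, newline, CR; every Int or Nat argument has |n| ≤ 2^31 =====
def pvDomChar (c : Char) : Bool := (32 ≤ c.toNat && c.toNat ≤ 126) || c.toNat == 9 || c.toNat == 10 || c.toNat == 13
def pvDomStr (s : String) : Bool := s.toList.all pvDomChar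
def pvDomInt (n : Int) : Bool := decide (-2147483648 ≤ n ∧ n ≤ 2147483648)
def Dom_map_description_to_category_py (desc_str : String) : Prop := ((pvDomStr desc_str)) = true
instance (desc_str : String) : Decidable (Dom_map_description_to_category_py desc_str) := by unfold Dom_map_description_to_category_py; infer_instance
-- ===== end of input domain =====

-- B replaces A's first-match if-elif ladder by an exhaustive pass: collect the priorities of ALL matching keywords and take the minimum (alternative decomposition; same cost).

-- ===== PORT A =====
def map_description_to_category_py (desc_str : String) : String :=
  let desc_lower := PySem.Str.lower desc_str
  if PySem.Str.isIn "stock options" desc_lower &&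
      (PySem.Str.isIn "non-qualified" desc_lower || PySem.Str.isIn "other than esop" desc_lower) then
    "stock_options_esop"
  else if PySem.Str.isIn "accommodation" desc_lower then
    "accommodation_perquisite"
  else if ["car", "automotive", "vehicle"].any (fun w => PySem.Str.isIn w desc_lower) then
    "car_perquisite"
  else if PySem.Str.isIn "free meals" desc_lower || PySem.Str.isIn "meals" desc_lower then
    "free_meals"
  else if PySem.Str.isIn "education" desc_lower then
    "education_fees"
  else if PySem.Str.isIn "credit card" desc_lower then
    "credit_card_fees"
  else if PySem.Str.isIn "club" desc_lower then
    "club_membership"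
  else if PySem.Str.isIn "holiday" desc_lower then
    "holiday_travel"
  else if ["sweeper", "gardener", "watchman", "attendant"].any (fun w => PySem.Str.isIn w desc_lower) then
    "domestic_help"
  else if ["gas", "electricity", "water"].any (fun w => PySem.Str.isIn w desc_lower) then
    "other_perquisites"
  else if PySem.Str.isIn "loan" desc_lower then
    "concessional_loans"
  else if ["gift", "voucher"].any (fun w => PySem.Str.isIn w desc_lower) then
    "other_perquisites"
  else if ["other benefit", "amenity", "service", "privilege"].any (fun w => PySem.Str.isIn w desc_lower) then
    "other_perquisites"
  else
    "other_perquisites"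

-- ===== PORT B =====
def pvPriority : List (String × Nat) :=
  [ ("accommodation", 0),
    ("car", 1), ("automotive", 1), ("vehicle", 1),
    ("meals", 2),
    ("education", 3),
    ("credit card", 4),
    ("club", 5),
    ("holiday", 6),
    ("sweeper", 7), ("gardener", 7), ("watchman", 7), ("attendant", 7),
    ("gas", 8), ("electricity", 8), ("water", 8),
    ("loan", 9) ]

def pvCategories : List String :=
  [ "accommodation_perquisite", "car_perquisite", "free_meals",
    "education_fees", "credit_card_fees", "club_membership",
    "holiday_travel", "domestic_help", "other_perquisites",
    "concessional_loans" ]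

def map_description_to_category_py_alt (desc_str : String) : String :=
  let d := PySem.Str.lower desc_str
  if PySem.Str.isIn "stock options" d &&
      (PySem.Str.isIn "non-qualified" d || PySem.Str.isIn "other than esop" d) then
    "stock_options_esop"
  else
    let hits := (pvPriority.filter (fun kp => PySem.Str.isIn kp.1 d)).map Prod.snd
    match PySem.List.min? hits (fun p => p) with
    | some m => pvCategories.getD m ""
    | none => "other_perquisites"

-- ===== PRECONDITION & SPEC =====
def Spec_map_description_to_category_py (desc_str : String) (out : String) : Prop := out = map_description_to_category_py_alt desc_str
instance (desc_str : String) (out : String) : Decidable (Spec_map_description_to_category_py desc_str out) := by unfold Spec_map_description_to_category_py; infer_instance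

-- ===== CLAIM (what is proved, stated in full; the proofs are below) =====
def Claim_equal_map_description_to_category_py : Prop := ∀ (desc_str : String), Dom_map_description_to_category_py desc_str → Spec_map_description_to_category_py desc_str (map_description_to_category_py desc_str)

-- ===== LEMMAS AND PROOFS =====

-- 'free meals' in d implies 'meals' in d, so A's disjunction collapses to the single keyword 'meals'.
lemma meals_or (s : String) :
    (PySem.Str.isIn "free meals" s || PySem.Str.isIn "meals" s) = PySem.Str.isIn "meals" s := by
  cases hf : PySem.Str.isIn "free meals" s
  · simp
  · have hm : PySem.Str.isIn "meals" s = true :=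
      (PySem.Str.isIn_iff_infix _ _).mpr
        ((by decide : "meals".toList <:+: "free meals".toList).trans
          ((PySem.Str.isIn_iff_infix _ _).mp hf))
    rw [hm]
    decide

-- first-match scan over a list (the value A's ladder computes, abstractly)
def firstP {α : Type} (q : α → Bool) (pr : α → Nat) : List α → Option Nat
  | [] => none
  | a :: t => if q a then some (pr a) else firstP q pr t

lemma foldl_min_eq (x : Nat) : ∀ (t : List Nat), (∀ y ∈ t, x ≤ y) → t.foldl min x = x
  | [], _ => rfl
  | a :: t, h => by
      have hx : min x a = x := Nat.min_eq_left (h a (by simp))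
      simp only [List.foldl, hx]
      exact foldl_min_eq x t (fun y hy => h y (by simp [hy]))

-- On a priority-sorted list, the minimum priority among ALL matches is the FIRST match.
lemma min_filter_firstP {α : Type} (q : α → Bool) (pr : α → Nat) :
    ∀ l : List α, l.Pairwise (fun a b => pr a ≤ pr b) →
      PySem.List.min? ((l.filter q).map pr) (fun x => x) = firstP q pr l
  | [], _ => rfl
  | a :: t, h => by
      rcases List.pairwise_cons.mp h with ⟨hle, hpt⟩
      by_cases hq : q a
      · simp only [List.filter_cons, hq, if_true, List.map_cons, firstP,
          PySem.List.min?_id_cons]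
        have : ((t.filter q).map pr).foldl min (pr a) = pr a := by
          apply foldl_min_eq
          intro y hy
          rcases List.mem_map.mp hy with ⟨b, hb, rfl⟩
          exact hle b (List.mem_of_mem_filter hb)
        rw [this]
      · simp only [List.filter_cons, hq, firstP]
        exact min_filter_firstP q pr t hpt

set_option maxHeartbeats 2000000 in
theorem pv_main (desc_str : String) :
    map_description_to_category_py desc_str = map_description_to_category_py_alt desc_str := by
  have hkey := min_filter_firstP (fun kp : String × Nat => PySem.Str.isIn kp.1 (PySem.Str.lower desc_str))
      Prod.snd pvPriority (by simp [pvPriority])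
  simp only [map_description_to_category_py, map_description_to_category_py_alt]
  rw [hkey, meals_or]
  simp only [firstP, pvPriority, pvCategories, List.any_cons, List.any_nil, Bool.or_false]
  clear hkey
  cases hg : (PySem.Str.isIn "stock options" (PySem.Str.lower desc_str) && (PySem.Str.isIn "non-qualified" (PySem.Str.lower desc_str) || PySem.Str.isIn "other than esop" (PySem.Str.lower desc_str))) with
  | true => simp
  | false =>
    cases h0 : PySem.Str.isIn "accommodation" (PySem.Str.lower desc_str) with
    | true => simp
    | false =>
      cases h1 : PySem.Str.isIn "car" (PySem.Str.lower desc_str) with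
      | true => simp
      | false =>
        cases h2 : PySem.Str.isIn "automotive" (PySem.Str.lower desc_str) with
        | true => simp
        | false =>
          cases h3 : PySem.Str.isIn "vehicle" (PySem.Str.lower desc_str) with
          | true => simp
          | false =>
            cases h4 : PySem.Str.isIn "meals" (PySem.Str.lower desc_str) with
            | true => simp
            | false =>
              cases h5 : PySem.Str.isIn "education" (PySem.Str.lower desc_str) with
              | true => simp
              | false =>
                cases h6 : PySem.Str.isIn "credit card" (PySem.Str.lower desc_str) with
                | true => simp
                | false =>
                  cases h7 : PySem.Str.isIn "club" (PySem.Str.lower desc_str) with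
                  | true => simp
                  | false =>
                    cases h8 : PySem.Str.isIn "holiday" (PySem.Str.lower desc_str) with
                    | true => simp
                    | false =>
                      cases h9 : PySem.Str.isIn "sweeper" (PySem.Str.lower desc_str) with
                      | true => simp
                      | false =>
                        cases h10 : PySem.Str.isIn "gardener" (PySem.Str.lower desc_str) with
                        | true => simp
                        | false =>
                          cases h11 : PySem.Str.isIn "watchman" (PySem.Str.lower desc_str) with
                          | true => simp
                          | false =>
                            cases h12 : PySem.Str.isIn "attendant" (PySem.Str.lower desc_str) with
                            | true => simp
                            | false =>
                              cases h13 : PySem.Str.isIn "gas" (PySem.Str.lower desc_str) with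
                              | true => simp
                              | false =>
                                cases h14 : PySem.Str.isIn "electricity" (PySem.Str.lower desc_str) with
                                | true => simp
                                | false =>
                                  cases h15 : PySem.Str.isIn "water" (PySem.Str.lower desc_str) with
                                  | true => simp
                                  | false =>
                                    cases h16 : PySem.Str.isIn "loan" (PySem.Str.lower desc_str) with
                                    | true => simp
                                    | false => simp

-- ===== VERDICT (by name: the statement is the Claim_ definition above) =====
theorem map_description_to_category_py_spec : Claim_equal_map_description_to_category_py := by
  intro d _
  unfold Spec_map_description_to_category_py
  exact pv_main d
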